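-- pv_equiv track=rewrite | github.com/cuiyeshuai/submission | functions.py | type_generate_mixed
-- ===== SOURCE A (Python) =====
-- def type_generate_mixed(x, level, specific_labels_node, specific_labels_edge):
--     zero_types = {}
--     for node in x[0]:
--         zero_types[node] = frozenset(x[0][node]) if specific_labels_node else frozenset((x[0][node][0],))
--     prov_types = {} # prov_types up to level h
--     for i in range(level + 1):
--         prov_types[i] = {}
--     prov_types[0] = {node: (zero_types[node],) for node in zero_types}
--     for i in range(1, level+1):
--         for source in x[1]: #iterate through all edges
--             for destination, edge_type in x[1][source]:
--                 if destination in prov_types[i-1]: #if the destination is in the previous level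
--                     if prov_types[i].get(source) is None:
--                         prov_types[i][source] = ((frozenset(edge_type),)
--                             if specific_labels_edge else (frozenset((edge_type[0],)),)) + prov_types[i-1][destination]
--                     else:
--                         prov_types[i][source] = tuple(m|n for m, n in zip(prov_types[i][source], ((frozenset(edge_type),)
--                             if specific_labels_edge else (frozenset((edge_type[0],)),)) + prov_types[i-1][destination]))
--     return prov_types
-- ===== SOURCE B (Python) =====
-- def type_generate_mixed(x, level, specific_labels_node, specific_labels_edge):
--     def node_set(labels):
--         return frozenset(labels) if specific_labels_node else frozenset(labels[:1])
--
--     def edge_set(et):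
--         return frozenset(et) if specific_labels_edge else frozenset(et[:1])
--
--     def union_all(first, rest):
--         acc = first
--         for s in rest:
--             acc = acc | s
--         return acc
--
--     prov_types = {0: {n: (node_set(ls),) for n, ls in x[0].items()}}
--     for i in range(1, level + 1):
--         prev = prov_types[i - 1]
--         cur = {}
--         for source, edges in x[1].items():
--             valid = [(edge_set(et), prev[d]) for d, et in edges if d in prev]
--             if valid:
--                 (e0, t0), rest = valid[0], valid[1:]
--                 cur[source] = tuple(
--                     union_all(e0, [e for e, _ in rest]) if k == 0
--                     else union_all(t0[k - 1], [t[k - 1] for _, t in rest])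
--                     for k in range(i + 1))
--         prov_types[i] = cur
--     return prov_types
-- ===== Notes on version B (the rewrite author's own statement) =====
-- stated objective: alternative
-- what changed: B builds each level tuple transposed, position by position (position 0 = union of the edge-type sets over valid neighbours, position k = union of the neighbours' previous tuples' (k-1)-th sets over range(i+1)), instead of A's per-edge in-place dict update that zips and position-wise-unions whole tuples with a None-check branch; correct because all level-i tuples have length i+1.
import Mathlib
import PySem

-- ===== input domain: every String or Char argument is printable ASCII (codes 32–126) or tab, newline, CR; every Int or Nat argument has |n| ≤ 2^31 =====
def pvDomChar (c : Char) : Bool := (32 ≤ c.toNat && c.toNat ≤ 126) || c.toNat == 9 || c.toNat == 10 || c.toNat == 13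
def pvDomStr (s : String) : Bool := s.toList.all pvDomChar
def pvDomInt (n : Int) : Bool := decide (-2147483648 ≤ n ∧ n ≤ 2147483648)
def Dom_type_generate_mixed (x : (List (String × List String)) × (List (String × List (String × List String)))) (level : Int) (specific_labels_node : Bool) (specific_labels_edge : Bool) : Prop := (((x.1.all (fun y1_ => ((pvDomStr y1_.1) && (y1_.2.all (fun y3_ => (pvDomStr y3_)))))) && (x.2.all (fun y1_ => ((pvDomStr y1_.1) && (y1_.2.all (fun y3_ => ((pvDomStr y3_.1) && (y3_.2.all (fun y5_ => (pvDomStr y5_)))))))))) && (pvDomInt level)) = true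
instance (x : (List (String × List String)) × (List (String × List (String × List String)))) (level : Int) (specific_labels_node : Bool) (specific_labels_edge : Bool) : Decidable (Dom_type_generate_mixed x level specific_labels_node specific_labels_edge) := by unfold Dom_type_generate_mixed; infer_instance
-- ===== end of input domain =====

-- B computes each level tuple TRANSPOSED, position by position (position 0 = union of the
-- edge-type sets over valid neighbours, position k = union of the neighbours' previous
-- tuples' (k-1)-th sets), so A's per-edge dict mutation, its None-check branch and its
-- whole-tuple zip/position-wise-union all disappear (objective: alternative).

-- ===== PORT A =====
-- frozenset(edge_type) / frozenset((edge_type[0],)); the getD "" default is dead under Pre_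
-- (edge_type[0] on an empty list is an IndexError, excluded by Pre_).
def tgmContribA (specific_labels_edge : Bool) (edge_type : List String) : List String :=
  if specific_labels_edge then PySem.Set.ofList edge_type
  else PySem.Set.ofList [((PySem.List.pyGet? edge_type 0).getD "")]

-- the inner 'for destination, edge_type in x[1][source]' loop of A
def tgmInnerA (specific_labels_edge : Bool) (prev : PySem.Dict String (List (List String)))
    (source : String) (dests : List (String × List String))
    (cur : PySem.Dict String (List (List String))) : PySem.Dict String (List (List String)) :=
  dests.foldl (fun cur de =>
    match prev.get? de.1 with
    | none => cur
    | some prevT =>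
      match cur.get? source with
      | none => cur.insert source (tgmContribA specific_labels_edge de.2 :: prevT)
      | some t => cur.insert source
          (((t.zip (tgmContribA specific_labels_edge de.2 :: prevT)).map
            (fun mn => PySem.Set.union mn.1 mn.2)))) cur

-- one pass of 'for source in x[1]' building prov_types[i]
def tgmStepA (specific_labels_edge : Bool) (edges : List (String × List (String × List String)))
    (prev : PySem.Dict String (List (List String))) : PySem.Dict String (List (List String)) :=
  edges.foldl (fun cur se => tgmInnerA specific_labels_edge prev se.1 se.2 cur) PySem.Dict.empty

def type_generate_mixed (x : (List (String × List String)) × (List (String × List (String × List String)))) (level : Int) (specific_labels_node : Bool) (specific_labels_edge : Bool) : List (Int × List (String × List (List String))) :=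
  let zero : PySem.Dict String (List String) :=
    x.1.foldl (fun d nv => d.insert nv.1
      (if specific_labels_node then PySem.Set.ofList nv.2
       else PySem.Set.ofList [((PySem.List.pyGet? nv.2 0).getD "")])) PySem.Dict.empty
  let base : PySem.Dict String (List (List String)) :=
    zero.items.foldl (fun d kv => d.insert kv.1 [kv.2]) PySem.Dict.empty
  -- prov_types keys are 0..level (0 when level < 0), each filled in order, so the returned
  -- dict is [(0, base)] followed by the levels produced by the range loop
  ((PySem.List.pyRange 1 (level + 1) 1).foldl
    (fun (st : List (Int × List (String × List (List String))) × PySem.Dict String (List (List String))) i =>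
      let cur := tgmStepA specific_labels_edge x.2 st.2
      (st.1 ++ [(i, cur.items)], cur))
    ([((0 : Int), base.items)], base)).1

-- ===== PORT B =====
def tgmNodeSetB (specific_labels_node : Bool) (labels : List String) : List String :=
  if specific_labels_node then PySem.Set.ofList labels else PySem.Set.ofList (labels.take 1)

def tgmEdgeSetB (specific_labels_edge : Bool) (et : List String) : List String :=
  if specific_labels_edge then PySem.Set.ofList et else PySem.Set.ofList (et.take 1)

-- union_all(first, rest)
def tgmUnionAll (first : List String) (rest : List (List String)) : List String :=
  rest.foldl PySem.Set.union first

-- position k of the transposed tuple for first contribution v and the rest vs; Python's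
-- t[k-1] is ported as getD (k-1) []: it is in range on every reachable state, since all
-- tuples of level i-1 have length i (tgm_stepB_len below), so the default is dead.
def tgmPosB (v : List String × List (List String))
    (vs : List (List String × List (List String))) (k : Nat) : List String :=
  if k = 0 then tgmUnionAll v.1 (vs.map Prod.fst)
  else tgmUnionAll (v.2.getD (k - 1) []) (vs.map (fun w => w.2.getD (k - 1) []))

-- one level of B: n = the current level number i (tuples of level i-1 have length n,
-- the new ones length n+1, i.e. Python's range(i+1))
def tgmStepB (specific_labels_edge : Bool) (edges : List (String × List (String × List String)))
    (n : Nat) (prev : List (String × List (List String))) : List (String × List (List String)) :=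
  edges.filterMap (fun se =>
    match se.2.filterMap (fun de =>
        (prev.lookup de.1).map (fun t => (tgmEdgeSetB specific_labels_edge de.2, t))) with
    | [] => none
    | v :: vs => some (se.1, (List.range (n + 1)).map (tgmPosB v vs)))

def tgmLevelsB (specific_labels_edge : Bool) (edges : List (String × List (String × List String))) :
    List (String × List (List String)) → Int → Nat → Nat → List (Int × List (String × List (List String)))
  | _, _, _, 0 => []
  | prev, i, n, m + 1 =>
    let cur := tgmStepB specific_labels_edge edges n prev
    (i, cur) :: tgmLevelsB specific_labels_edge edges cur (i + 1) (n + 1) m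

def type_generate_mixed_alt (x : (List (String × List String)) × (List (String × List (String × List String)))) (level : Int) (specific_labels_node : Bool) (specific_labels_edge : Bool) : List (Int × List (String × List (List String))) :=
  let base := x.1.map (fun nv => (nv.1, [tgmNodeSetB specific_labels_node nv.2]))
  ((0 : Int), base) :: tgmLevelsB specific_labels_edge x.2 base 1 1 level.toNat

-- ===== PRECONDITION & SPEC =====
-- Pre_ excludes (a) association lists with duplicate dict keys in x.1 or x.2, which a Python
-- dict cannot carry, and (b) inputs on which A raises IndexError because an indexed labels /
-- edge-type list is empty while its specific_labels flag is false (for edge types stated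
-- conservatively over all edges once level ≥ 1, so it also drops some inputs where the empty
-- edge type sits on an edge whose destination is never reached and A still returns).
def Pre_type_generate_mixed (x : (List (String × List String)) × (List (String × List (String × List String)))) (level : Int) (specific_labels_node : Bool) (specific_labels_edge : Bool) : Prop :=
  (x.1.map Prod.fst).Nodup ∧ (x.2.map Prod.fst).Nodup ∧
  (specific_labels_node = false → ∀ nv ∈ x.1, nv.2 ≠ []) ∧
  (specific_labels_edge = false → 1 ≤ level → ∀ se ∈ x.2, ∀ de ∈ se.2, de.2 ≠ [])
instance (x : (List (String × List String)) × (List (String × List (String × List String)))) (level : Int) (specific_labels_node : Bool) (specific_labels_edge : Bool) : Decidable (Pre_type_generate_mixed x level specific_labels_node specific_labels_edge) := by unfold Pre_type_generate_mixed; infer_instance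

def pvWitness_type_generate_mixed : ((List (String × List String)) × (List (String × List (String × List String)))) × Int × Bool × Bool :=
  (([("a", ["x"]), ("b", ["y", "x"])], [("a", [("b", ["e"]), ("a", ["f"])]), ("b", [("a", ["e"])])]), 2, true, false)

def Spec_type_generate_mixed (x : (List (String × List String)) × (List (String × List (String × List String)))) (level : Int) (specific_labels_node : Bool) (specific_labels_edge : Bool) (out : List (Int × List (String × List (List String)))) : Prop := out = type_generate_mixed_alt x level specific_labels_node specific_labels_edge
instance (x : (List (String × List String)) × (List (String × List (String × List String)))) (level : Int) (specific_labels_node : Bool) (specific_labels_edge : Bool) (out : List (Int × List (String × List (List String)))) : Decidable (Spec_type_generate_mixed x level specific_labels_node specific_labels_edge out) := by unfold Spec_type_generate_mixed; infer_instance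

-- ===== CLAIM (what is proved, stated in full; the proofs are below) =====
def Claim_equal_type_generate_mixed : Prop := ∀ (x : (List (String × List String)) × (List (String × List (String × List String)))) (level : Int) (specific_labels_node : Bool) (specific_labels_edge : Bool), Dom_type_generate_mixed x level specific_labels_node specific_labels_edge → Pre_type_generate_mixed x level specific_labels_node specific_labels_edge → Spec_type_generate_mixed x level specific_labels_node specific_labels_edge (type_generate_mixed x level specific_labels_node specific_labels_edge)

-- ===== LEMMAS AND PROOFS =====

-- proof-side intermediate form: A's per-source result as a left fold of position-wise unions
-- over the gathered contribution tuples (bridges A's dict mutation to B's transposition)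
def tgmPwUnion (a b : List (List String)) : List (List String) :=
  (a.zip b).map (fun mn => PySem.Set.union mn.1 mn.2)

def tgmContribsA (sle : Bool) (prev : PySem.Dict String (List (List String)))
    (dests : List (String × List String)) : List (List (List String)) :=
  dests.filterMap (fun de => (prev.get? de.1).map (fun t => tgmContribA sle de.2 :: t))

def tgmStepF (sle : Bool) (edges : List (String × List (String × List String)))
    (prev : List (String × List (List String))) : List (String × List (List String)) :=
  edges.filterMap (fun se =>
    match se.2.filterMap (fun de =>
        ((PySem.Dict.mk prev).get? de.1).map (fun t => tgmContribA sle de.2 :: t)) with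
    | [] => none
    | c :: cs => some (se.1, cs.foldl tgmPwUnion c))

theorem tgm_lookup_mem {α β : Type} [BEq α] [LawfulBEq α] (l : List (α × β)) (a : α) (b : β)
    (h : l.lookup a = some b) : (a, b) ∈ l := by
  induction l with
  | nil => simp [List.lookup] at h
  | cons p t ih =>
    rw [List.lookup] at h
    by_cases hb : a == p.1
    · simp only [hb] at h
      cases p
      simp_all
    · simp only [hb] at h
      exact List.mem_cons_of_mem _ (ih h)

theorem tgm_get?_mk (l : List (String × List (List String))) (k : String) :
    (PySem.Dict.mk l).get? k = l.lookup k := by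
  induction l with
  | nil => rfl
  | cons p t ih =>
    rw [show p = (p.1, p.2) from rfl, PySem.Dict.get?_mk_cons, List.lookup]
    by_cases h : p.1 = k
    · simp [h]
    · have hb : (k == p.1) = false := beq_eq_false_iff_ne.mpr (Ne.symm h)
      simp [h, hb, ih]

theorem tgm_contrib_eq (sle : Bool) (et : List String) (h : sle = false → et ≠ []) :
    tgmContribA sle et = tgmEdgeSetB sle et := by
  cases sle with
  | true => rfl
  | false =>
    cases et with
    | nil => exact absurd rfl (h rfl)
    | cons a t => simp [tgmContribA, tgmEdgeSetB, PySem.List.pyGet?, PySem.List.pyIdx?]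

theorem tgmInnerA_cons (sle : Bool) (prev : PySem.Dict String (List (List String)))
    (s : String) (de : String × List String) (rest : List (String × List String))
    (cur : PySem.Dict String (List (List String))) :
    tgmInnerA sle prev s (de :: rest) cur =
      tgmInnerA sle prev s rest
        (match prev.get? de.1 with
         | none => cur
         | some prevT =>
           match cur.get? s with
           | none => cur.insert s (tgmContribA sle de.2 :: prevT)
           | some t => cur.insert s (tgmPwUnion t (tgmContribA sle de.2 :: prevT))) := rfl

theorem tgm_innerA_phase2 (sle : Bool) (prev : PySem.Dict String (List (List String)))
    (s : String) (dests : List (String × List String))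
    (d0 : PySem.Dict String (List (List String)))
    (c : List (List String)) :
    tgmInnerA sle prev s dests (d0.insert s c)
      = d0.insert s ((tgmContribsA sle prev dests).foldl tgmPwUnion c) := by
  induction dests generalizing c with
  | nil => rfl
  | cons de rest ih =>
    rw [tgmInnerA_cons]
    cases hp : prev.get? de.1 with
    | none =>
      simp only
      rw [ih c]
      simp [tgmContribsA, hp]
    | some t =>
      simp only [PySem.Dict.get?_insert_self, PySem.Dict.insert_insert_self]
      rw [ih (tgmPwUnion c (tgmContribA sle de.2 :: t))]
      simp [tgmContribsA, hp]

theorem tgm_innerA_fresh (sle : Bool) (prev : PySem.Dict String (List (List String)))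
    (s : String) (dests : List (String × List String))
    (d0 : PySem.Dict String (List (List String))) (h : d0.contains s = false) :
    tgmInnerA sle prev s dests d0
      = match tgmContribsA sle prev dests with
        | [] => d0
        | c :: cs => d0.insert s (cs.foldl tgmPwUnion c) := by
  induction dests with
  | nil => rfl
  | cons de rest ih =>
    rw [tgmInnerA_cons]
    cases hp : prev.get? de.1 with
    | none =>
      simp only
      rw [ih]
      simp [tgmContribsA, hp]
    | some t =>
      have hn : d0.get? s = none := (PySem.Dict.get?_eq_none_iff_contains d0 s).mpr h
      simp only [hn]
      rw [tgm_innerA_phase2 sle prev s rest d0 (tgmContribA sle de.2 :: t)]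
      simp [tgmContribsA, hp]

theorem tgm_stepA_items (sle : Bool) (prev : PySem.Dict String (List (List String)))
    (pairs : List (String × List (String × List String)))
    (acc : List (String × List (List String)))
    (hnd : (pairs.map Prod.fst).Nodup)
    (hfresh : ∀ p ∈ pairs, p.1 ∉ acc.map Prod.fst) :
    pairs.foldl (fun cur se => tgmInnerA sle prev se.1 se.2 cur) (PySem.Dict.mk acc)
      = PySem.Dict.mk (acc ++ pairs.filterMap (fun se =>
          match tgmContribsA sle prev se.2 with
          | [] => none
          | c :: cs => some (se.1, cs.foldl tgmPwUnion c))) := by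
  induction pairs generalizing acc with
  | nil => simp
  | cons se rest ih =>
    have hs : (PySem.Dict.mk acc).contains se.1 = false := by
      rw [PySem.Dict.contains_mk]
      simp only [List.any_eq_false]
      intro p hp hbeq
      exact hfresh se (by simp) (by
        simp only [List.mem_map]
        exact ⟨p, hp, by simpa using hbeq⟩)
    simp only [List.foldl_cons]
    rw [tgm_innerA_fresh sle prev se.1 se.2 _ hs]
    cases hc : tgmContribsA sle prev se.2 with
    | nil =>
      simp only
      rw [ih acc (by simp only [List.map_cons, List.nodup_cons] at hnd; exact hnd.2) (fun p hp => hfresh p (by simp [hp]))]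
      simp [hc]
    | cons c cs =>
      have hins : (PySem.Dict.mk acc).insert se.1 (cs.foldl tgmPwUnion c)
          = PySem.Dict.mk (acc ++ [(se.1, cs.foldl tgmPwUnion c)]) := by
        apply PySem.Dict.ext
        rw [PySem.Dict.items_insert_of_not_contains _ _ hs]
      simp only
      rw [hins, ih (acc ++ [(se.1, cs.foldl tgmPwUnion c)])
        (by simp only [List.map_cons, List.nodup_cons] at hnd; exact hnd.2)
        (fun p hp => by
          simp only [List.map_append, List.mem_append, List.map_cons]
          rintro (hl | hr)
          · exact hfresh p (by simp [hp]) hl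
          · simp only [List.map_nil, List.mem_singleton] at hr
            have : se.1 ∉ rest.map Prod.fst := by
              have h' := hnd
              simp only [List.map_cons] at h'
              exact (List.nodup_cons.mp h').1
            exact this (hr ▸ List.mem_map_of_mem hp))]
      simp [hc]

-- A's step, as a pure function of the previous level's association list
theorem tgm_stepA_eq_stepF (sle : Bool) (edges : List (String × List (String × List String)))
    (pl : List (String × List (List String)))
    (hnd : (edges.map Prod.fst).Nodup) :
    tgmStepA sle edges (PySem.Dict.mk pl) = PySem.Dict.mk (tgmStepF sle edges pl) := by
  rw [tgmStepA, show (PySem.Dict.empty : PySem.Dict String (List (List String)))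
      = PySem.Dict.mk [] from rfl]
  rw [tgm_stepA_items sle (PySem.Dict.mk pl) edges [] hnd (by simp)]
  rfl

-- fold of position-wise unions = transposition, when all tuples share one length
theorem tgm_fold_transpose (L : Nat) (cs : List (List (List String))) :
    ∀ (c : List (List String)), c.length = L → (∀ c' ∈ cs, c'.length = L) →
    cs.foldl tgmPwUnion c
      = (List.range L).map (fun k => tgmUnionAll (c.getD k []) (cs.map (fun d => d.getD k []))) := by
  induction cs with
  | nil =>
    intro c hc _
    simp only [List.foldl_nil, List.map_nil, tgmUnionAll]
    apply List.ext_getElem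
    · simp [hc]
    · intro i h1 h2
      simp only [List.getElem_map, List.getElem_range]
      rw [List.getD_eq_getElem c [] (by omega)]
  | cons c' cs ih =>
    intro c hc hcs
    have hlen : (tgmPwUnion c c').length = L := by
      simp only [tgmPwUnion, List.length_map, List.length_zip, hc, hcs c' (by simp)]
      omega
    rw [List.foldl_cons, ih (tgmPwUnion c c') hlen (fun d hd => hcs d (by simp [hd]))]
    apply List.map_congr_left
    intro k hk
    have hkL : k < L := List.mem_range.mp hk
    have hget : (tgmPwUnion c c').getD k []
        = PySem.Set.union (c.getD k []) (c'.getD k []) := by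
      rw [List.getD_eq_getElem _ [] (by omega),
          List.getD_eq_getElem c [] (by omega),
          List.getD_eq_getElem c' [] (by rw [hcs c' (by simp)]; omega)]
      simp [tgmPwUnion]
    rw [hget]
    simp [tgmUnionAll]

-- A's fold over whole contribution tuples equals B's transposed build, under the
-- length invariant on the previous level
theorem tgm_stepF_eq_stepB (sle : Bool) (edges : List (String × List (String × List String)))
    (n : Nat) (pl : List (String × List (List String)))
    (hlen : ∀ p ∈ pl, (p.2 : List (List String)).length = n)
    (hedge : sle = false → ∀ se ∈ edges, ∀ de ∈ se.2, de.2 ≠ []) :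
    tgmStepF sle edges pl = tgmStepB sle edges n pl := by
  unfold tgmStepF tgmStepB
  apply List.filterMap_congr
  intro se hse
  have hcb : se.2.filterMap (fun de =>
        ((PySem.Dict.mk pl).get? de.1).map (fun t => tgmContribA sle de.2 :: t))
      = (se.2.filterMap (fun de =>
          (pl.lookup de.1).map (fun t => (tgmEdgeSetB sle de.2, t)))).map
          (fun v => v.1 :: v.2) := by
    rw [List.map_filterMap]
    apply List.filterMap_congr
    intro de hde
    rw [tgm_get?_mk, tgm_contrib_eq sle de.2 (fun hf => hedge hf se hse de hde)]
    cases pl.lookup de.1 <;> rfl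
  rw [hcb]
  cases hv : se.2.filterMap (fun de =>
      (pl.lookup de.1).map (fun t => (tgmEdgeSetB sle de.2, t))) with
  | nil => rfl
  | cons v vs =>
    have hmem : ∀ w ∈ v :: vs, (w.2 : List (List String)).length = n := by
      intro w hw
      rw [← hv] at hw
      obtain ⟨de, _, hmap⟩ := List.mem_filterMap.mp hw
      cases hlk : pl.lookup de.1 with
      | none => rw [hlk] at hmap; simp at hmap
      | some t =>
        rw [hlk] at hmap
        simp only [Option.map_some, Option.some.injEq] at hmap
        have := hlen (de.1, t) (tgm_lookup_mem pl de.1 t hlk)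
        rw [← hmap]
        exact this
    simp only [List.map_cons]
    rw [tgm_fold_transpose (n + 1) (vs.map (fun v => v.1 :: v.2)) (v.1 :: v.2)
      (by simp [hmem v (by simp)])
      (by
        intro c' hc'
        obtain ⟨w, hw, hweq⟩ := List.mem_map.mp hc'
        rw [← hweq]
        simp [hmem w (by simp [hw])])]
    congr 2
    apply List.map_congr_left
    intro k hk
    cases k with
    | zero =>
      rw [List.map_map, List.getD_cons_zero, tgmPosB, if_pos (rfl : (0:Nat) = 0)]
      congr 1
    | succ j =>
      rw [List.map_map, List.getD_cons_succ, tgmPosB, if_neg (by omega)]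
      simp only [Nat.add_sub_cancel]
      congr 1

-- every tuple B's step produces has length n+1
theorem tgm_stepB_len (sle : Bool) (edges : List (String × List (String × List String)))
    (n : Nat) (pl : List (String × List (List String))) :
    ∀ p ∈ tgmStepB sle edges n pl, (p.2 : List (List String)).length = n + 1 := by
  intro p hp
  obtain ⟨se, _, hmap⟩ := List.mem_filterMap.mp hp
  cases hv : se.2.filterMap (fun de =>
      (pl.lookup de.1).map (fun t => (tgmEdgeSetB sle de.2, t))) with
  | nil => rw [hv] at hmap; simp at hmap
  | cons v vs =>
    rw [hv] at hmap
    simp only [Option.some.injEq] at hmap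
    rw [← hmap]
    simp

theorem tgm_levels_bridge (sle : Bool) (edges : List (String × List (String × List String)))
    (hnd : (edges.map Prod.fst).Nodup)
    (hedge : sle = false → ∀ se ∈ edges, ∀ de ∈ se.2, de.2 ≠ [])
    (m : Nat) :
    ∀ (i : Int) (n : Nat) (acc : List (Int × List (String × List (List String))))
      (pl : List (String × List (List String))),
    (∀ p ∈ pl, (p.2 : List (List String)).length = n) →
    ((PySem.List.pyRange i (i + m) 1).foldl
      (fun (st : List (Int × List (String × List (List String))) × PySem.Dict String (List (List String))) j =>
        let cur := tgmStepA sle edges st.2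
        (st.1 ++ [(j, cur.items)], cur)) (acc, PySem.Dict.mk pl)).1
      = acc ++ tgmLevelsB sle edges pl i n m := by
  induction m with
  | zero =>
    intro i n acc pl _
    rw [show i + (0 : Nat) = i by omega, PySem.List.pyRange_one]
    simp [tgmLevelsB]
  | succ m ih =>
    intro i n acc pl hlen
    rw [show ((m + 1 : Nat) : Int) = (m : Int) + 1 by push_cast; ring]
    rw [PySem.List.pyRange_one_cons (by omega : i < i + ((m : Int) + 1)), List.foldl_cons]
    simp only
    rw [tgm_stepA_eq_stepF sle edges pl hnd, tgm_stepF_eq_stepB sle edges n pl hlen hedge]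
    rw [show i + ((m : Int) + 1) = (i + 1) + (m : Int) by ring]
    rw [ih (i + 1) (n + 1) (acc ++ [(i, (PySem.Dict.mk (tgmStepB sle edges n pl)).items)])
      (tgmStepB sle edges n pl) (tgm_stepB_len sle edges n pl)]
    rw [tgmLevelsB]
    simp

theorem tgm_base_bridge (x1 : List (String × List String)) (sln : Bool)
    (hnd : (x1.map Prod.fst).Nodup) (hlab : sln = false → ∀ nv ∈ x1, nv.2 ≠ []) :
    (((x1.foldl (fun d nv => d.insert nv.1
        (if sln then PySem.Set.ofList nv.2
         else PySem.Set.ofList [((PySem.List.pyGet? nv.2 0).getD "")])) PySem.Dict.empty) :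
        PySem.Dict String (List String)).items.foldl
      (fun d kv => d.insert kv.1 [kv.2]) PySem.Dict.empty)
      = PySem.Dict.mk (x1.map (fun nv => (nv.1, [tgmNodeSetB sln nv.2]))) := by
  have hz : ((x1.foldl (fun d nv => d.insert nv.1
        (if sln then PySem.Set.ofList nv.2
         else PySem.Set.ofList [((PySem.List.pyGet? nv.2 0).getD "")])) PySem.Dict.empty) :
        PySem.Dict String (List String)).items
      = x1.map (fun nv => (nv.1,
          if sln then PySem.Set.ofList nv.2
          else PySem.Set.ofList [((PySem.List.pyGet? nv.2 0).getD "")])) := by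
    rw [PySem.Dict.items_foldl_insert_fresh x1 Prod.fst _ PySem.Dict.empty
      (fun a _ => PySem.Dict.contains_empty a.1) hnd]
    rfl
  apply PySem.Dict.ext
  rw [hz]
  rw [PySem.Dict.items_foldl_insert_fresh _ Prod.fst (fun kv => [kv.2]) PySem.Dict.empty
    (fun a _ => PySem.Dict.contains_empty a.1) (by simpa [List.map_map, Function.comp] using hnd)]
  simp only [List.map_map]
  simp only [show (PySem.Dict.empty : PySem.Dict String (List (List String))).items = [] from rfl,
    List.nil_append]
  apply List.map_congr_left
  intro nv hnv
  simp only [Function.comp]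
  congr 1
  cases sln with
  | true => simp [tgmNodeSetB]
  | false =>
    cases hl : nv.2 with
    | nil => exact absurd hl (hlab rfl nv hnv)
    | cons a t => simp [tgmNodeSetB, PySem.List.pyGet?, PySem.List.pyIdx?]

-- ===== VERDICT (by name: the statement is the Claim_ definition above) =====
theorem type_generate_mixed_spec : Claim_equal_type_generate_mixed := by
  intro x level sln sle _ hpre
  obtain ⟨hnd1, hnd2, hlab, hedge⟩ := hpre
  unfold Spec_type_generate_mixed type_generate_mixed type_generate_mixed_alt
  simp only
  rw [tgm_base_bridge x.1 sln hnd1 hlab]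
  by_cases hl : 1 ≤ level
  · have h1 : level + 1 = 1 + (level.toNat : Int) := by omega
    rw [h1, tgm_levels_bridge sle x.2 hnd2 (fun hf => hedge hf hl) level.toNat 1 1
      [((0 : Int), (PySem.Dict.mk (x.1.map (fun nv => (nv.1, [tgmNodeSetB sln nv.2])))).items)]
      (x.1.map (fun nv => (nv.1, [tgmNodeSetB sln nv.2])))
      (by
        intro p hp
        obtain ⟨nv, _, hmap⟩ := List.mem_map.mp hp
        rw [← hmap]
        rfl)]
    rfl
  · have hz : level.toNat = 0 := by omega
    rw [show PySem.List.pyRange 1 (level + 1) 1 = [] by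
      rw [PySem.List.pyRange_one]
      rw [show (level + 1 - 1).toNat = 0 by omega]
      simp]
    rw [hz]
    rfl
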